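-- pv_equiv track=rewrite | github.com/AmaanIbnNasar/advent-of-code-2022 | aoc/day_one/day_one.py | get_elf_calories_summed
-- ===== SOURCE A (Python) =====
-- def get_elf_calories_summed(array_of_calories: list[int]) -> list[int]:
--     elves = []
--     new_elf = []
--     for i, n in enumerate(array_of_calories):
--         if n == -99:
--             elves.append(new_elf)
--             new_elf = []
--             continue
--         new_elf.append(n)
--         if i == len(array_of_calories) - 1:
--             elves.append(new_elf)
--     summed_elves = [sum(elf) for elf in elves]
--     return summed_elves
-- ===== SOURCE B (Python) =====
-- def get_elf_calories_summed(array_of_calories: list[int]) -> list[int]: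
--     sums = []
--     acc = 0
--     for n in array_of_calories:
--         if n == -99:
--             sums.append(acc)
--             acc = 0
--         else:
--             acc += n
--     if array_of_calories and array_of_calories[-1] != -99:
--         sums.append(acc)
--     return sums
-- ===== Notes on version B (the rewrite author's own statement) =====
-- stated objective: simpler
-- what changed: B keeps a single running-sum integer per group and appends the trailing sum after the loop (guarded by the last element), instead of A's accumulation of per-group sublists with an in-loop last-index check followed by a second summing pass.
import Mathlib
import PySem

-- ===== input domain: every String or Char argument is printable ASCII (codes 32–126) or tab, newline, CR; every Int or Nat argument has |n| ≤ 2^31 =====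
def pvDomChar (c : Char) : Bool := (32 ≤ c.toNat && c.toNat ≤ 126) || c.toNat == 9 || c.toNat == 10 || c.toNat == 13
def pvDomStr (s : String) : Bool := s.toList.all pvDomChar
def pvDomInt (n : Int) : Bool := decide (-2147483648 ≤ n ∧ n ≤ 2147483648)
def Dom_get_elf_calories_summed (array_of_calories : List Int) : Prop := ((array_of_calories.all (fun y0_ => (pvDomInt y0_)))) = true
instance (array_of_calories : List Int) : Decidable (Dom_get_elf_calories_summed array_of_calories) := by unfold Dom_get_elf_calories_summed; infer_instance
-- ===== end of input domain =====

-- ===== PORT A =====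
-- B replaces A's per-group sublists + second summing pass by one pass with a running sum; same values.
def stepA (N : Int) (s : List (List Int) × List Int) (p : Int × Int) : List (List Int) × List Int :=
  if p.2 = -99 then (s.1 ++ [s.2], [])
  else
    let new_elf := s.2 ++ [p.2]
    if p.1 = N - 1 then (s.1 ++ [new_elf], new_elf) else (s.1, new_elf)

def get_elf_calories_summed (array_of_calories : List Int) : List Int :=
  let st := (PySem.List.enumerate array_of_calories).foldl (stepA (array_of_calories.length : Int)) ([], [])
  st.1.map (fun elf => elf.sum)

-- ===== PORT B =====
def stepB (s : List Int × Int) (n : Int) : List Int × Int :=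
  if n = -99 then (s.1 ++ [s.2], 0) else (s.1, s.2 + n)

def get_elf_calories_summed_alt (array_of_calories : List Int) : List Int :=
  let st := array_of_calories.foldl stepB ([], 0)
  if array_of_calories ≠ [] ∧ array_of_calories.getLast? ≠ some (-99) then st.1 ++ [st.2] else st.1

-- ===== PRECONDITION & SPEC =====
def Spec_get_elf_calories_summed (array_of_calories : List Int) (out : List Int) : Prop := out = get_elf_calories_summed_alt array_of_calories
instance (array_of_calories : List Int) (out : List Int) : Decidable (Spec_get_elf_calories_summed array_of_calories out) := by unfold Spec_get_elf_calories_summed; infer_instance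

-- ===== CLAIM (what is proved, stated in full; the proofs are below) =====
def Claim_equal_get_elf_calories_summed : Prop := ∀ (array_of_calories : List Int), Dom_get_elf_calories_summed array_of_calories → Spec_get_elf_calories_summed array_of_calories (get_elf_calories_summed array_of_calories)

-- ===== LEMMAS AND PROOFS =====
-- common characterisation: list of group sums, dropping the would-be trailing group when the list ends
def grpSums : List Int → Int → List Int
  | [], _ => []
  | n :: rest, acc =>
    if n = -99 then acc :: grpSums rest 0
    else if rest = [] then [acc + n] else grpSums rest (acc + n)

theorem foldA_eq (xs : List Int) : ∀ (i N : Int) (elves : List (List Int)) (new_elf : List Int),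
    i + (xs.length : Int) = N →
    ((PySem.List.enumerate xs i).foldl (stepA N) (elves, new_elf)).1.map List.sum
      = elves.map List.sum ++ grpSums xs new_elf.sum := by
  induction xs with
  | nil => intro i N elves new_elf h; simp [PySem.List.enumerate_nil, grpSums]
  | cons n rest ih =>
    intro i N elves new_elf h
    rw [PySem.List.enumerate_cons, List.foldl_cons]
    by_cases hn : n = -99
    · subst hn
      rw [show stepA N (elves, new_elf) (i, -99) = (elves ++ [new_elf], []) from by simp [stepA]]
      rw [ih (i+1) N _ _ (by simp at h ⊢; omega)]
      simp [grpSums, List.map_append]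
    · by_cases hr : rest = []
      · have hi : i = N - 1 := by subst hr; simp at h; omega
        subst hr
        rw [show stepA N (elves, new_elf) (i, n)
              = (elves ++ [new_elf ++ [n]], new_elf ++ [n]) from by simp [stepA, hn, hi]]
        simp [PySem.List.enumerate_nil, grpSums, hn, List.map_append]
      · have hi : i ≠ N - 1 := by
          have : (rest.length : Int) > 0 := by
            cases rest with | nil => exact absurd rfl hr | cons a t => simp
          simp at h; omega
        rw [show stepA N (elves, new_elf) (i, n)
              = (elves, new_elf ++ [n]) from by simp [stepA, hn, hi]]
        rw [ih (i+1) N _ _ (by simp at h ⊢; omega)]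
        simp [grpSums, hn, hr]

theorem foldB_eq (xs : List Int) : ∀ (out : List Int) (acc : Int),
    (if xs ≠ [] ∧ xs.getLast? ≠ some (-99)
      then (xs.foldl stepB (out, acc)).1 ++ [(xs.foldl stepB (out, acc)).2]
      else (xs.foldl stepB (out, acc)).1)
    = out ++ grpSums xs acc := by
  induction xs with
  | nil => intro out acc; simp [grpSums]
  | cons n rest ih =>
    intro out acc
    by_cases hr : rest = []
    · subst hr
      by_cases hn : n = -99
      · simp [stepB, hn, grpSums]
      · simp [stepB, hn, grpSums]
    · obtain ⟨a, t, rfl⟩ : ∃ a t, rest = a :: t := by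
        cases rest with | nil => exact absurd rfl hr | cons a t => exact ⟨a, t, rfl⟩
      rw [List.foldl_cons]
      by_cases hn : n = -99
      · subst hn
        rw [show stepB (out, acc) (-99) = (out ++ [acc], 0) from by simp [stepB]]
        rw [show grpSums (-99 :: a :: t) acc = acc :: grpSums (a :: t) 0 from by simp [grpSums]]
        have h2 := ih (out ++ [acc]) 0
        simp only [ne_eq, List.getLast?_cons_cons, List.cons_ne_nil, not_false_iff, true_and] at h2 ⊢
        rw [h2]; simp
      · rw [show stepB (out, acc) n = (out, acc + n) from by simp [stepB, hn]]
        rw [show grpSums (n :: a :: t) acc = grpSums (a :: t) (acc + n) from by simp [grpSums, hn]]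
        have h2 := ih out (acc + n)
        simp only [ne_eq, List.getLast?_cons_cons, List.cons_ne_nil, not_false_iff, true_and] at h2 ⊢
        rw [h2]

-- ===== VERDICT (by name: the statement is the Claim_ definition above) =====
theorem get_elf_calories_summed_spec : Claim_equal_get_elf_calories_summed := by
  intro xs _
  unfold Spec_get_elf_calories_summed get_elf_calories_summed get_elf_calories_summed_alt
  have hA := foldA_eq xs 0 (xs.length : Int) [] [] (by simp)
  have hB := foldB_eq xs [] 0
  simp only [List.sum_nil] at hA
  simp only [List.map_nil, List.nil_append] at hA hB
  rw [hA, ← hB]
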